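-- pv_equiv track=rewrite | github.com/travisahumphreys/barcodes | connector-prep/generate.py | group_by_assembly
-- ===== SOURCE A (Python) =====
-- def group_by_assembly(records):
--     """
--     Group records by assembly prefix (first 4 digits of bundle).
--     Returns dict: {prefix: {bundle: [records]}}
--     """
--     assemblies = {}
--     for record in records:
--         bundle = record["bundle"]
--         # Extract Assembly ID (without dash number)
--         if "-" in bundle:
--             prefix = bundle.split("-")[0]
--         else:
--             prefix = bundle[:4]
--
--         if prefix not in assemblies:
--             assemblies[prefix] = {}
--         if bundle not in assemblies[prefix]:
--             assemblies[prefix][bundle] = []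
--         assemblies[prefix][bundle].append(record)
--
--     return assemblies
-- ===== SOURCE B (Python) =====
-- def group_by_assembly(records):
--     """Group records by assembly prefix: {prefix: {bundle: [records]}}."""
--     def prefix_of(b):
--         return b.split("-")[0] if "-" in b else b[:4]
--     tagged = [(prefix_of(r["bundle"]), r["bundle"], r) for r in records]
--     prefixes = list(dict.fromkeys(p for (p, b, r) in tagged))
--     return {
--         p: {b: [r for (q2, b2, r) in tagged if b2 == b]
--             for b in dict.fromkeys(b for (q, b, r) in tagged if q == p)}
--         for p in prefixes
--     }
-- ===== Notes on version B (the rewrite author's own statement) =====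
-- stated objective: alternative
-- what changed: A builds the nested result in one pass by mutating a dict-of-dicts per record; B instead deduplicates the prefix and bundle key lists up front (dict.fromkeys) and assembles the whole result with nested comprehensions that filter the tagged record list per key.
import Mathlib
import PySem

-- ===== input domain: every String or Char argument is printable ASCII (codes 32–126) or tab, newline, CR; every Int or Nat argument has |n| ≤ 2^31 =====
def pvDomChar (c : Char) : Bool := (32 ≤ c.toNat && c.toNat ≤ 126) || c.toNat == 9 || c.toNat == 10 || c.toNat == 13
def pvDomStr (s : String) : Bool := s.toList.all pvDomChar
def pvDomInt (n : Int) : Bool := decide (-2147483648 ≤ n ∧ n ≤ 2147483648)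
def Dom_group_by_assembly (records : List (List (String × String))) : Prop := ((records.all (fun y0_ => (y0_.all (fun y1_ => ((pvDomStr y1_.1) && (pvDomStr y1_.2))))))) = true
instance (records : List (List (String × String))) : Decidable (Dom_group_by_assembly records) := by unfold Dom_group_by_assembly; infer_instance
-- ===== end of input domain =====

-- B replaces A's single-pass mutable nested-dict build with a dedup-the-keys-then-filter
-- nested comprehension (objective: alternative decomposition; no speed claim).

-- ===== PORT A =====
-- shared helper: prefix = bundle.split("-")[0] if "-" in bundle else bundle[:4]
def bundlePrefix (b : String) : String :=
  if PySem.Str.isIn "-" b then ((PySem.Str.split? b "-").getD []).headD ""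
  else PySem.Str.slice b none (some 4)

-- the body of A's `for record in records` loop, acting on `assemblies`
def groupStep (asm : PySem.Dict String (PySem.Dict String (List (List (String × String)))))
    (record : List (String × String)) :
    PySem.Dict String (PySem.Dict String (List (List (String × String)))) :=
  let bundle := (record.lookup "bundle").getD ""
  let p := bundlePrefix bundle
  let asm := if asm.contains p then asm else asm.insert p PySem.Dict.empty
  let inner := asm.getD p PySem.Dict.empty
  let inner := if inner.contains bundle then inner else inner.insert bundle []
  -- assemblies[p][bundle].append(record)
  let inner := inner.insert bundle (inner.getD bundle [] ++ [record])
  asm.insert p inner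

def group_by_assembly (records : List (List (String × String))) :
    List (String × List (String × List (List (String × String)))) :=
  let assemblies := records.foldl groupStep PySem.Dict.empty
  assemblies.items.map (fun q => (q.1, q.2.items))

-- ===== PORT B =====
def group_by_assembly_alt (records : List (List (String × String))) :
    List (String × List (String × List (List (String × String)))) :=
  let tagged := records.map (fun r =>
    (bundlePrefix ((r.lookup "bundle").getD ""), ((r.lookup "bundle").getD ""), r))
  let prefixes := PySem.List.dedup (tagged.map (fun t => t.1))
  prefixes.map (fun p =>
    (p, (PySem.List.dedup ((tagged.filter (fun t => t.1 == p)).map (fun t => t.2.1))).map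
      (fun b => (b, (tagged.filter (fun t => t.2.1 == b)).map (fun t => t.2.2)))))

-- ===== PRECONDITION & SPEC =====
-- Pre_ excludes exactly the inputs with a record lacking the "bundle" key: there A raises KeyError.
def Pre_group_by_assembly (records : List (List (String × String))) : Prop :=
  ∀ r ∈ records, "bundle" ∈ r.map (fun q => q.1)
instance (records : List (List (String × String))) : Decidable (Pre_group_by_assembly records) := by unfold Pre_group_by_assembly; infer_instance

def pvWitness_group_by_assembly : (List (List (String × String))) :=
  [[("bundle", "1234-1"), ("sku", "a")], [("bundle", "1234-2")], [("bundle", "99887")]]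

def Spec_group_by_assembly (records : List (List (String × String))) (out : List (String × List (String × List (List (String × String))))) : Prop := out = group_by_assembly_alt records
instance (records : List (List (String × String))) (out : List (String × List (String × List (List (String × String))))) : Decidable (Spec_group_by_assembly records out) := by
  unfold Spec_group_by_assembly
  letI d1 : DecidableEq (List (List (String × String))) := inferInstance
  letI d2 : DecidableEq (String × List (List (String × String))) := inferInstance
  letI d3 : DecidableEq (List (String × List (List (String × String)))) := inferInstance
  letI d4 : DecidableEq (String × List (String × List (List (String × String)))) := inferInstance
  infer_instance

-- ===== CLAIM (what is proved, stated in full; the proofs are below) =====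
def Claim_equal_group_by_assembly : Prop := ∀ (records : List (List (String × String))), Dom_group_by_assembly records → Pre_group_by_assembly records → Spec_group_by_assembly records (group_by_assembly records)

-- ===== LEMMAS AND PROOFS =====

-- bundle and prefix of a record
def pvKb (r : List (String × String)) : String := (r.lookup "bundle").getD ""
def pvKp (r : List (String × String)) : String := bundlePrefix (pvKb r)

-- the per-prefix bundle list B builds
def pvBundles (l : List (List (String × String))) (p : String) : List String :=
  PySem.List.dedup ((l.filter (fun r => pvKp r == p)).map pvKb)

-- the inner dict for one prefix, and the full nested dict, as B computes them
def pvInner (l : List (List (String × String))) (p : String) :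
    PySem.Dict String (List (List (String × String))) :=
  PySem.Dict.mk ((pvBundles l p).map (fun b => (b, l.filter (fun r => pvKb r == b))))

def pvModel (l : List (List (String × String))) :
    PySem.Dict String (PySem.Dict String (List (List (String × String)))) :=
  PySem.Dict.mk ((PySem.List.dedup (l.map pvKp)).map (fun p => (p, pvInner l p)))

theorem keys_pvModel (l : List (List (String × String))) :
    (pvModel l).keys = PySem.List.dedup (l.map pvKp) := by
  simp [pvModel, PySem.Dict.keys_mk, List.map_map, Function.comp_def]

theorem mem_items_pvModel {l : List (List (String × String))} {p : String}
    (h : p ∈ PySem.List.dedup (l.map pvKp)) : (p, pvInner l p) ∈ (pvModel l).items := by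
  simp only [pvModel]
  exact List.mem_map.mpr ⟨p, h, rfl⟩

theorem getD_pvModel {l : List (List (String × String))} {p : String}
    (h : p ∈ PySem.List.dedup (l.map pvKp)) (d0 : PySem.Dict String (List (List (String × String)))) :
    (pvModel l).getD p d0 = pvInner l p := by
  refine PySem.Dict.getD_of_mem_items _ (mem_items_pvModel h) ?_ d0
  rw [keys_pvModel]
  exact PySem.List.nodup_dedup _

theorem contains_pvModel (l : List (List (String × String))) (p : String) :
    (pvModel l).contains p = decide (p ∈ PySem.List.dedup (l.map pvKp)) := by
  by_cases h : p ∈ PySem.List.dedup (l.map pvKp)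
  · have hc : (pvModel l).contains p = true :=
      (PySem.Dict.contains_iff_mem_keys _ _).mpr (by rw [keys_pvModel]; exact h)
    rw [hc, decide_eq_true h]
  · rw [decide_eq_false h]
    rcases hc : (pvModel l).contains p with _ | _
    · rfl
    · exact absurd (by rw [← keys_pvModel l]; exact (PySem.Dict.contains_iff_mem_keys _ _).mp hc) h

theorem mem_pvBundles {l : List (List (String × String))} {p b : String}
    (h : b ∈ pvBundles l p) : bundlePrefix b = p := by
  rw [pvBundles, PySem.List.dedup_eq_ofList, PySem.Set.mem_ofList] at h
  obtain ⟨r, hr, rfl⟩ := List.mem_map.mp h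
  have := (List.mem_filter.mp hr).2
  simpa [pvKp] using this

theorem filter_kb_nil {l : List (List (String × String))} {b : String}
    (h : b ∉ (l.filter (fun r => pvKp r == bundlePrefix b)).map pvKb) :
    l.filter (fun r => pvKb r == b) = [] := by
  rw [List.filter_eq_nil_iff]
  intro r hr hrb
  apply h
  have hb : pvKb r = b := by simpa using hrb
  refine List.mem_map.mpr ⟨r, List.mem_filter.mpr ⟨hr, by simp [pvKp, hb]⟩, hb⟩

theorem pvInner_unchanged {l : List (List (String × String))} {r : List (String × String)}
    {q : String} (h : pvKp r ≠ q) : pvInner (l ++ [r]) q = pvInner l q := by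
  have hB : pvBundles (l ++ [r]) q = pvBundles l q := by
    simp [pvBundles, List.filter_append, h]
  rw [pvInner, pvInner, hB]
  congr 1
  refine List.map_congr_left (fun b hb => ?_)
  have hbq := mem_pvBundles hb
  have hkb : pvKb r ≠ b := by
    intro he
    exact h (by rw [pvKp, he, hbq])
  simp [List.filter_append, hkb]

theorem keys_pvInner (l : List (List (String × String))) (p : String) :
    (pvInner l p).keys = pvBundles l p := by
  simp [pvInner, PySem.Dict.keys_mk, List.map_map, Function.comp_def]

theorem nodup_keys_pvInner (l : List (List (String × String))) (p : String) :
    (pvInner l p).keys.Nodup := by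
  rw [keys_pvInner, pvBundles]; exact PySem.List.nodup_dedup _

theorem getD_pvInner {l : List (List (String × String))} {p b : String}
    (h : b ∈ pvBundles l p) (d0 : List (List (String × String))) :
    (pvInner l p).getD b d0 = l.filter (fun r => pvKb r == b) := by
  refine PySem.Dict.getD_of_mem_items _ ?_ (nodup_keys_pvInner l p) d0
  exact List.mem_map.mpr ⟨b, h, rfl⟩

theorem contains_pvInner (l : List (List (String × String))) (p b : String) :
    (pvInner l p).contains b = decide (b ∈ pvBundles l p) := by
  by_cases h : b ∈ pvBundles l p
  · have hc : (pvInner l p).contains b = true :=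
      (PySem.Dict.contains_iff_mem_keys _ _).mpr (by rw [keys_pvInner]; exact h)
    rw [hc, decide_eq_true h]
  · rw [decide_eq_false h]
    rcases hc : (pvInner l p).contains b with _ | _
    · rfl
    · exact absurd (by rw [← keys_pvInner l p]; exact (PySem.Dict.contains_iff_mem_keys _ _).mp hc) h

theorem pvBundles_append (l : List (List (String × String))) (r : List (String × String)) :
    pvBundles (l ++ [r]) (pvKp r) = PySem.Set.add (pvBundles l (pvKp r)) (pvKb r) := by
  rw [pvBundles, pvBundles, List.filter_append]
  simp only [List.filter_cons, List.filter_nil, BEq.rfl, if_true, List.map_append, List.map_cons,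
    List.map_nil, PySem.List.dedup_eq_ofList, PySem.Set.ofList_append_singleton]

theorem pvInner_step (l : List (List (String × String))) (r : List (String × String)) :
    pvInner (l ++ [r]) (pvKp r) =
      (let inner := pvInner l (pvKp r)
       let inner2 := if inner.contains (pvKb r) then inner else inner.insert (pvKb r) []
       inner2.insert (pvKb r) (inner2.getD (pvKb r) [] ++ [r])) := by
  simp only [contains_pvInner]
  by_cases hb : pvKb r ∈ pvBundles l (pvKp r)
  · simp only [hb, decide_true, if_true]
    apply PySem.Dict.ext
    rw [PySem.Dict.items_insert_of_contains _ _ (by rw [contains_pvInner]; exact decide_eq_true hb),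
      getD_pvInner hb]
    show ((pvBundles (l ++ [r]) (pvKp r)).map _) = _
    rw [pvBundles_append, PySem.Set.add_of_mem hb]
    show ((pvBundles l (pvKp r)).map
        (fun b => (b, (l ++ [r]).filter (fun r' => pvKb r' == b)))) = _
    rw [show (pvInner l (pvKp r)).items =
        (pvBundles l (pvKp r)).map (fun b => (b, l.filter (fun r' => pvKb r' == b))) from rfl,
      List.map_map]
    refine List.map_congr_left (fun b' hb' => ?_)
    by_cases he : b' = pvKb r
    · subst he
      simp [List.filter_append]
    · have hne : pvKb r ≠ b' := fun h => he h.symm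
      simp [List.filter_append, hne, he]
  · simp only [hb, decide_false, Bool.false_eq_true, if_false]
    rw [PySem.Dict.getD_insert_self, PySem.Dict.insert_insert_self]
    apply PySem.Dict.ext
    have hcontains : (pvInner l (pvKp r)).contains (pvKb r) = false := by
      rw [contains_pvInner]; exact decide_eq_false hb
    rw [PySem.Dict.items_insert_of_not_contains _ _ hcontains]
    show ((pvBundles (l ++ [r]) (pvKp r)).map _) = _
    rw [pvBundles_append, PySem.Set.add_of_not_mem hb, List.map_append]
    have hnil : l.filter (fun r' => pvKb r' == pvKb r) = [] := by
      apply filter_kb_nil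
      intro hmem
      exact hb (by rw [pvBundles, PySem.List.dedup_eq_ofList, PySem.Set.mem_ofList]; exact hmem)
    congr 1
    · refine List.map_congr_left (fun b' hb' => ?_)
      have hne : pvKb r ≠ b' := fun h => hb (h ▸ hb')
      simp [List.filter_append, hne]
    · simp [List.filter_append, hnil]

theorem filter_kp_nil {l : List (List (String × String))} {p : String}
    (h : p ∉ l.map pvKp) : l.filter (fun r => pvKp r == p) = [] := by
  rw [List.filter_eq_nil_iff]
  intro r hr hrp
  exact h (List.mem_map.mpr ⟨r, hr, by simpa using hrp⟩)

theorem pvInner_empty {l : List (List (String × String))} {p : String}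
    (h : p ∉ l.map pvKp) : pvInner l p = PySem.Dict.empty := by
  rw [pvInner, pvBundles, filter_kp_nil h]
  rfl

theorem step_pvModel (l : List (List (String × String))) (r : List (String × String)) :
    groupStep (pvModel l) r = pvModel (l ++ [r]) := by
  show (let asm := if (pvModel l).contains (pvKp r) then pvModel l
          else (pvModel l).insert (pvKp r) PySem.Dict.empty
        let inner := asm.getD (pvKp r) PySem.Dict.empty
        let inner2 := if inner.contains (pvKb r) then inner else inner.insert (pvKb r) []
        asm.insert (pvKp r) (inner2.insert (pvKb r) (inner2.getD (pvKb r) [] ++ [r]))) =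
      pvModel (l ++ [r])
  rw [contains_pvModel]
  by_cases hp : pvKp r ∈ PySem.List.dedup (l.map pvKp)
  · simp only [hp, decide_true, if_true, getD_pvModel hp]
    show (pvModel l).insert (pvKp r) _ = _
    rw [← pvInner_step]
    apply PySem.Dict.ext
    rw [PySem.Dict.items_insert_of_contains _ _ (by rw [contains_pvModel]; exact decide_eq_true hp)]
    show _ = ((PySem.List.dedup ((l ++ [r]).map pvKp)).map fun p => (p, pvInner (l ++ [r]) p))
    rw [List.map_append, List.map_cons, List.map_nil, PySem.List.dedup_eq_ofList,
      PySem.Set.ofList_append_singleton,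
      PySem.Set.add_of_mem (by rw [← PySem.List.dedup_eq_ofList]; exact hp),
      ← PySem.List.dedup_eq_ofList]
    rw [show (pvModel l).items =
        (PySem.List.dedup (l.map pvKp)).map (fun p => (p, pvInner l p)) from rfl, List.map_map]
    refine List.map_congr_left (fun q hq => ?_)
    by_cases he : q = pvKp r
    · subst he; simp
    · have hne : pvKp r ≠ q := fun h => he h.symm
      simp [he, pvInner_unchanged hne]
  · simp only [hp, decide_false, Bool.false_eq_true, if_false]
    have hmem : pvKp r ∉ l.map pvKp := by
      intro h
      exact hp (by rw [PySem.List.dedup_eq_ofList, PySem.Set.mem_ofList]; exact h)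
    rw [PySem.Dict.getD_insert_self, PySem.Dict.insert_insert_self, ← pvInner_empty hmem]
    show (pvModel l).insert (pvKp r) _ = _
    rw [← pvInner_step]
    apply PySem.Dict.ext
    have hcontains : (pvModel l).contains (pvKp r) = false := by
      rw [contains_pvModel]; exact decide_eq_false hp
    rw [PySem.Dict.items_insert_of_not_contains _ _ hcontains]
    show _ = ((PySem.List.dedup ((l ++ [r]).map pvKp)).map fun p => (p, pvInner (l ++ [r]) p))
    rw [List.map_append, List.map_cons, List.map_nil, PySem.List.dedup_eq_ofList,
      PySem.Set.ofList_append_singleton,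
      PySem.Set.add_of_not_mem (by rw [← PySem.List.dedup_eq_ofList]; exact hp),
      ← PySem.List.dedup_eq_ofList, List.map_append]
    congr 1
    refine List.map_congr_left (fun q hq => ?_)
    have hne : pvKp r ≠ q := fun h => hp (h ▸ hq)
    rw [pvInner_unchanged hne]

theorem foldl_pvModel (l : List (List (String × String))) :
    l.foldl groupStep PySem.Dict.empty = pvModel l := by
  induction l using List.reverseRecOn with
  | nil => rfl
  | append_singleton l r ih => rw [List.foldl_append, List.foldl_cons, List.foldl_nil, ih, step_pvModel]

theorem alt_eq_pvModel (records : List (List (String × String))) :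
    group_by_assembly_alt records = (pvModel records).items.map (fun q => (q.1, q.2.items)) := by
  have h1 : pvKb = fun x => (List.lookup "bundle" x).getD "" := rfl
  have h2 : pvKp = fun x => bundlePrefix ((List.lookup "bundle" x).getD "") := by
    funext x; rfl
  simp [group_by_assembly_alt, pvModel, pvInner, pvBundles, h1, h2,
    List.filter_map, List.map_map, Function.comp_def]

-- ===== VERDICT (by name: the statement is the Claim_ definition above) =====
theorem group_by_assembly_spec : Claim_equal_group_by_assembly := by
  intro records _ _
  show group_by_assembly records = group_by_assembly_alt records
  rw [group_by_assembly, alt_eq_pvModel, foldl_pvModel]
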